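-- pv_equiv track=rewrite | github.com/weidongcao/huanLing | src/main/com/dong/yong/yong_english_words.py | get_wubi_key
-- ===== SOURCE A (Python) =====
-- tuple3 = (
--     'contr',
--     'creat',
--     'comp',
--     'cons',
--     'cont',
--     'conv',
--     'stat',
--     'inst',
--     'legi'
--     'sens',
--     'expe',
--     'proc',
--     'com',
--     'con',
--     'the',
--     'pro',
--     'imp',
--     'ser',
--     'per',
--     'str',
--     'div',
--     'dve',
--     'off',
--     'ref',
--     'tra',
--     'ele',
--     'cha',
--     'res',
--     'sur',
--     'whe',
--     'pre',
--     'sup',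
--     'sub',
--     'pri',
--     'gra',
--     'dis',
--     'des',
--     'dec',
--     'def',
--     'det',
--     'app',
--     'for',
--     'rep',
--     'ret',
--     'ass',
--     'pos',
--     'sho',
--     'sha',
--     'par',
--     'adv',
--     'acc',
--     'att',
--     'min',
--     'mon',
--     'sub',
--     'ex',
--     'in',
--     're',
--     'co',
--     'un')
--
-- combine = ('inter', 'trans', 'there', 'some', 'every', 'part', 'under', 'be', 'life', 'home', 'out', 'down', 'sh')
--
-- def get_wubi_key(value):
--     if value not in combine:
--         i = len(value) - 1
--         while i >= 2:
--             if value[0:i] in combine: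
--                 key = value[0:2] + value[i:i + 2]
--                 return key
--             i -= 1
--
--     if len(value) >= 4:
--         i = len(value) - 1
--         while i >= 2:
--             if value[0:i] in tuple3:
--                 key = value[0] + value[i:i + 2] + value[-1:]
--                 return key
--             i -= 1
--         # if value.endswith('s'):
--         #     key = value[0:2] + value[-2:]
--         # elif value.endswith('es'):
--         #     key = value[0:2] + value[-3] + value[-1]
--         # else:
--         #     key = value[0:3] + value[-1]
--         key = value[0:3] + value[-1]
--     else:
--         return value
--
--     return key
-- ===== SOURCE B (Python) =====
-- tuple3 = (
--     'contr',
--     'creat',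
--     'comp',
--     'cons',
--     'cont',
--     'conv',
--     'stat',
--     'inst',
--     'legi'
--     'sens',
--     'expe',
--     'proc',
--     'com',
--     'con',
--     'the',
--     'pro',
--     'imp',
--     'ser',
--     'per',
--     'str',
--     'div',
--     'dve',
--     'off',
--     'ref',
--     'tra',
--     'ele',
--     'cha',
--     'res',
--     'sur',
--     'whe',
--     'pre',
--     'sup',
--     'sub',
--     'pri',
--     'gra',
--     'dis',
--     'des',
--     'dec',
--     'def',
--     'det',
--     'app',
--     'for',
--     'rep',
--     'ret',
--     'ass',
--     'pos',
--     'sho',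
--     'sha',
--     'par',
--     'adv',
--     'acc',
--     'att',
--     'min',
--     'mon',
--     'sub',
--     'ex',
--     'in',
--     're',
--     'co',
--     'un')
--
-- combine = ('inter', 'trans', 'there', 'some', 'every', 'part', 'under', 'be', 'life', 'home', 'out', 'down', 'sh')
--
--
-- def _best_len(value, candidates):
--     # length of the longest candidate that is a proper prefix of value
--     # with length in [2, len(value)-1]; None if there is none
--     best = None
--     for e in candidates:
--         if 2 <= len(e) <= len(value) - 1 and value.startswith(e) and (best is None or len(e) > best):
--             best = len(e)
--     return best
--
--
-- def get_wubi_key(value):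
--     if value not in combine:
--         i = _best_len(value, combine)
--         if i is not None:
--             return value[0:2] + value[i:i + 2]
--     if len(value) >= 4:
--         i = _best_len(value, tuple3)
--         if i is not None:
--             return value[0] + value[i:i + 2] + value[-1:]
--         return value[0:3] + value[-1]
--     return value
-- ===== Notes on version B (the rewrite author's own statement) =====
-- stated objective: faster
-- what changed: Replaces A's downward while-loops that slice value[0:i] and test tuple membership for every i from len(value)-1 down to 2 with a single pass over the fixed candidate tuple keeping the length of the longest entry that is a proper prefix (via startswith) of value.
import Mathlib
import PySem

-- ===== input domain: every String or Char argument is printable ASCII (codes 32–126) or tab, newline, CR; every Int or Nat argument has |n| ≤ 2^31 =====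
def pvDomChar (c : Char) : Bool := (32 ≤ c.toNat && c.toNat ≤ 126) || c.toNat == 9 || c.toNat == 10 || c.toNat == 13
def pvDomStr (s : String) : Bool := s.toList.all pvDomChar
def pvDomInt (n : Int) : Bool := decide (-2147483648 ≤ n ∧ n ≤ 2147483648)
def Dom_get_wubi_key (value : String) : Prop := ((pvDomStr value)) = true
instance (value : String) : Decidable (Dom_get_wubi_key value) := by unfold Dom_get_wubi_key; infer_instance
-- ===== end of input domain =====

-- B replaces A's downward while-loops over prefix lengths with a single pass over the fixed
-- candidate tuple keeping the longest entry that is a proper prefix of value (objective: faster,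
-- measured).

-- ===== PORT A =====
-- the module-level tuples, verbatim (note 'legi' 'sens' concatenates to 'legisens', and 'sub' appears twice)
def tuple3L : List (List Char) :=
  ["contr".toList, "creat".toList, "comp".toList, "cons".toList, "cont".toList,
   "conv".toList, "stat".toList, "inst".toList, "legisens".toList, "expe".toList,
   "proc".toList, "com".toList, "con".toList, "the".toList, "pro".toList,
   "imp".toList, "ser".toList, "per".toList, "str".toList, "div".toList,
   "dve".toList, "off".toList, "ref".toList, "tra".toList, "ele".toList,
   "cha".toList, "res".toList, "sur".toList, "whe".toList, "pre".toList,
   "sup".toList, "sub".toList, "pri".toList, "gra".toList, "dis".toList,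
   "des".toList, "dec".toList, "def".toList, "det".toList, "app".toList,
   "for".toList, "rep".toList, "ret".toList, "ass".toList, "pos".toList,
   "sho".toList, "sha".toList, "par".toList, "adv".toList, "acc".toList,
   "att".toList, "min".toList, "mon".toList, "sub".toList, "ex".toList,
   "in".toList, "re".toList, "co".toList, "un".toList]

def combineL : List (List Char) :=
  ["inter".toList, "trans".toList, "there".toList, "some".toList, "every".toList,
   "part".toList, "under".toList, "be".toList, "life".toList, "home".toList,
   "out".toList, "down".toList, "sh".toList]

-- 'i = len(value)-1; while i >= 2: if value[0:i] in L: return key(i); i -= 1' (key built in the loop)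
def scanDown (L : List (List Char)) (key : Nat → List Char) (v : List Char) (i : Nat) : Option (List Char) :=
  if i < 2 then none
  else if PySem.List.slice v (some (0 : Int)) (some (i : Int)) ∈ L then some (key i)
  else scanDown L key v (i - 1)
termination_by i
decreasing_by omega

-- key = value[0:2] + value[i:i+2]
def keyComb (v : List Char) (i : Nat) : List Char :=
  PySem.List.slice v (some (0 : Int)) (some (2 : Int)) ++
    PySem.List.slice v (some (i : Int)) (some ((i : Int) + 2))

-- key = value[0] + value[i:i+2] + value[-1:]   (value[0] in range: guarded by len >= 4)
def keyTup (v : List Char) (i : Nat) : List Char :=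
  PySem.List.pyGetD v 0 ' ' ::
    (PySem.List.slice v (some (i : Int)) (some ((i : Int) + 2)) ++
      PySem.List.slice v (some (-1 : Int)) none)

def get_wubi_key (value : String) : String :=
  let v := value.toList
  let phase2 : List Char :=
    if 4 ≤ v.length then
      match scanDown tuple3L (keyTup v) v (v.length - 1) with
      | some k => k
      | none =>
          -- key = value[0:3] + value[-1]   (value[-1] in range: len >= 4)
          PySem.List.slice v (some (0 : Int)) (some (3 : Int)) ++ [PySem.List.pyGetD v (-1) ' ']
    else v
  let r : List Char :=
    if v ∉ combineL then
      match scanDown combineL (keyComb v) v (v.length - 1) with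
      | some k => k
      | none => phase2
    else phase2
  String.ofList r

-- ===== PORT B =====
-- length of the longest candidate that is a proper prefix of v with length in [2, len(v)-1]
def bestLen (v : List Char) (L : List (List Char)) : Option Nat :=
  L.foldl
    (fun best e =>
      if 2 ≤ e.length ∧ (e.length : Int) ≤ (v.length : Int) - 1 ∧ PySem.Chars.startswith v e = true then
        match best with
        | none => some e.length
        | some b => if b < e.length then some e.length else some b
      else best)
    none

def get_wubi_key_alt (value : String) : String :=
  let v := value.toList
  let phase2 : List Char :=
    if 4 ≤ v.length then
      match bestLen v tuple3L with
      | some i =>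
          PySem.List.pyGetD v 0 ' ' ::
            (PySem.List.slice v (some (i : Int)) (some ((i : Int) + 2)) ++
              PySem.List.slice v (some (-1 : Int)) none)
      | none =>
          PySem.List.slice v (some (0 : Int)) (some (3 : Int)) ++ [PySem.List.pyGetD v (-1) ' ']
    else v
  let r : List Char :=
    if v ∉ combineL then
      match bestLen v combineL with
      | some i =>
          PySem.List.slice v (some (0 : Int)) (some (2 : Int)) ++
            PySem.List.slice v (some (i : Int)) (some ((i : Int) + 2))
      | none => phase2
    else phase2
  String.ofList r

-- ===== PRECONDITION & SPEC =====
def Spec_get_wubi_key (value : String) (out : String) : Prop := out = get_wubi_key_alt value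
instance (value : String) (out : String) : Decidable (Spec_get_wubi_key value out) := by unfold Spec_get_wubi_key; infer_instance

-- ===== CLAIM (what is proved, stated in full; the proofs are below) =====
def Claim_equal_get_wubi_key : Prop := ∀ (value : String), Dom_get_wubi_key value → Spec_get_wubi_key value (get_wubi_key value)

-- ===== LEMMAS AND PROOFS =====

-- the predicate both searches decide: 'the prefix of length i is a candidate', restricted to i >= 2
abbrev PfxP (L : List (List Char)) (v : List Char) (i : Nat) : Prop := 2 ≤ i ∧ v.take i ∈ L

-- B's per-entry condition (the fold's test, as a named abbreviation)
abbrev CondB (v e : List Char) : Prop :=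
  2 ≤ e.length ∧ (e.length : Int) ≤ (v.length : Int) - 1 ∧ PySem.Chars.startswith v e = true

-- B's fold step, named, and the accumulator update it performs on a hit
def merge (acc : Option Nat) (l : Nat) : Nat :=
  match acc with
  | none => l
  | some b => if b < l then l else b

def bstep (v : List Char) (best : Option Nat) (e : List Char) : Option Nat :=
  if 2 ≤ e.length ∧ (e.length : Int) ≤ (v.length : Int) - 1 ∧ PySem.Chars.startswith v e = true then
    match best with
    | none => some e.length
    | some b => if b < e.length then some e.length else some b
  else best

lemma bestLen_eq_foldl (v : List Char) (L : List (List Char)) :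
    bestLen v L = L.foldl (bstep v) none := rfl

lemma le_merge_right (acc : Option Nat) (l : Nat) : l ≤ merge acc l := by
  cases acc with
  | none => simp [merge]
  | some b => by_cases h : b < l <;> simp [merge, h] <;> omega

lemma le_merge_left (b : Nat) (l : Nat) : b ≤ merge (some b) l := by
  by_cases h : b < l <;> simp [merge, h] <;> omega

lemma scanDown_eq (L : List (List Char)) (key : Nat → List Char) (v : List Char) :
    ∀ n, scanDown L key v n =
      if Nat.findGreatest (PfxP L v) n = 0 then none
      else some (key (Nat.findGreatest (PfxP L v) n)) := by
  intro n
  induction n using Nat.strong_induction_on with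
  | _ n ih =>
    rw [scanDown]
    by_cases h2 : n < 2
    · have hz : Nat.findGreatest (PfxP L v) n = 0 := by
        apply Nat.findGreatest_eq_zero_iff.2
        intro m hm hmn hP
        exact absurd hP.1 (by omega)
      simp [h2, hz]
    · obtain ⟨m, rfl⟩ : ∃ m, n = m + 1 := ⟨n - 1, by omega⟩
      have hslice : PySem.List.slice v (some (0 : Int)) (some ((m + 1 : Nat) : Int))
          = v.take (m + 1) := by
        rw [PySem.List.slice_zero_start, PySem.List.slice_to_natCast]
      rw [if_neg h2, hslice, Nat.findGreatest_succ]
      by_cases hmem : v.take (m + 1) ∈ L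
      · have hP : PfxP L v (m + 1) := ⟨by omega, hmem⟩
        rw [if_pos hmem, if_pos hP, if_neg (by omega)]
      · have hP : ¬ PfxP L v (m + 1) := fun h => hmem h.2
        rw [if_neg hmem, if_neg hP, Nat.add_sub_cancel]
        exact ih m (by omega)

-- any entry B accepts yields the prefix predicate within the scan range
lemma bridge1 (L : List (List Char)) (v e : List Char) (he : e ∈ L) (hc : CondB v e) :
    PfxP L v e.length ∧ e.length ≤ v.length - 1 := by
  obtain ⟨h2, hle, hsw⟩ := hc
  have hpfx : e <+: v := (PySem.Chars.startswith_iff v e).1 hsw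
  have hlen : e.length ≤ v.length := hpfx.length_le
  have htake : v.take e.length = e := (List.prefix_iff_eq_take.1 hpfx).symm
  exact ⟨⟨h2, by rw [htake]; exact he⟩, by omega⟩

-- conversely a prefix-length hit in the scan range is an entry B accepts
lemma bridge2 (L : List (List Char)) (v : List Char) (i : Nat)
    (hP : PfxP L v i) (hn : i ≤ v.length - 1) :
    CondB v (v.take i) ∧ (v.take i).length = i := by
  obtain ⟨h2, hmem⟩ := hP
  have hlen : i + 1 ≤ v.length := by
    rcases Nat.eq_zero_or_pos v.length with h | h <;> omega
  have htake : (v.take i).length = i := by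
    simp [List.length_take]; omega
  refine ⟨⟨by omega, by rw [htake]; omega, ?_⟩, htake⟩
  exact (PySem.Chars.startswith_iff v (v.take i)).2 (List.take_prefix i v)

-- invariant of B's single pass: the accumulator is the best length seen so far
lemma fold_spec (v : List Char) (L : List (List Char)) : ∀ (acc : Option Nat),
    (L.foldl (bstep v) acc = none → acc = none ∧ ∀ e ∈ L, ¬ CondB v e) ∧
    (∀ g, L.foldl (bstep v) acc = some g →
      ((acc = some g ∨ ∃ e ∈ L, CondB v e ∧ e.length = g) ∧
       (∀ b, acc = some b → b ≤ g) ∧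
       (∀ e ∈ L, CondB v e → e.length ≤ g))) := by
  induction L with
  | nil =>
    intro acc
    constructor
    · intro h
      simp only [List.foldl_nil] at h
      exact ⟨h, by simp⟩
    · intro g h
      simp only [List.foldl_nil] at h
      refine ⟨Or.inl h, fun b hb => ?_, by simp⟩
      rw [h] at hb
      exact le_of_eq (Option.some.inj hb).symm
  | cons e L ih =>
    intro acc
    rw [List.foldl_cons]
    obtain ⟨ihn, ihs⟩ := ih (bstep v acc e)
    by_cases hc : CondB v e
    · have hb : bstep v acc e = some (merge acc e.length) := by
        unfold bstep
        rw [if_pos hc]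
        cases acc with
        | none => rfl
        | some b => by_cases hble : b < e.length <;> simp [merge, hble]
      refine ⟨fun h => ?_, fun g h => ?_⟩
      · have h1 := (ihn h).1
        rw [hb] at h1
        exact absurd h1 (by simp)
      · obtain ⟨hd, hb2, htl⟩ := ihs g h
        have hm0 : merge acc e.length ≤ g := hb2 _ hb
        have helen : e.length ≤ g := le_trans (le_merge_right acc e.length) hm0
        refine ⟨?_, fun b hbacc => ?_, fun e' he' => ?_⟩
        · rcases hd with hd | ⟨e', he', hce', hlen'⟩
          · rw [hb] at hd
            have hmg : merge acc e.length = g := Option.some.inj hd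
            cases acc with
            | none => exact Or.inr ⟨e, List.mem_cons_self .., hc, hmg⟩
            | some b =>
              by_cases hble : b < e.length
              · refine Or.inr ⟨e, List.mem_cons_self .., hc, ?_⟩
                simpa [merge, hble] using hmg
              · refine Or.inl ?_
                have hbg : b = g := by simpa [merge, hble] using hmg
                rw [hbg]
          · exact Or.inr ⟨e', List.mem_cons_of_mem e he', hce', hlen'⟩
        · rw [hbacc] at hm0
          have := le_merge_left b e.length
          omega
        · rcases List.mem_cons.1 he' with rfl | he'
          · exact fun _ => helen
          · exact htl e' he'
    · have hb : bstep v acc e = acc := by unfold bstep; rw [if_neg hc]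
      rw [hb] at ihn ihs
      rw [hb]
      refine ⟨fun h => ?_, fun g h => ?_⟩
      · obtain ⟨h1, h2⟩ := ihn h
        refine ⟨h1, fun e' he' => ?_⟩
        rcases List.mem_cons.1 he' with rfl | he'
        · exact hc
        · exact h2 e' he'
      · obtain ⟨hd, hb2, htl⟩ := ihs g h
        refine ⟨?_, hb2, fun e' he' => ?_⟩
        · rcases hd with hd | ⟨e', he', hce', hlen'⟩
          · exact Or.inl hd
          · exact Or.inr ⟨e', List.mem_cons_of_mem e he', hce', hlen'⟩
        · rcases List.mem_cons.1 he' with rfl | he'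
          · exact fun h' => absurd h' hc
          · exact htl e' he'

lemma bestLen_eq (L : List (List Char)) (v : List Char) :
    bestLen v L =
      if Nat.findGreatest (PfxP L v) (v.length - 1) = 0 then none
      else some (Nat.findGreatest (PfxP L v) (v.length - 1)) := by
  rw [bestLen_eq_foldl]
  cases hbl : L.foldl (bstep v) (none : Option Nat) with
  | none =>
    obtain ⟨_, hno⟩ := (fold_spec v L none).1 hbl
    have hz : Nat.findGreatest (PfxP L v) (v.length - 1) = 0 := by
      apply Nat.findGreatest_eq_zero_iff.2
      intro m hm hmn hP
      obtain ⟨hcm, _⟩ := bridge2 L v m hP hmn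
      exact hno _ hP.2 hcm
    simp [hz]
  | some g =>
    obtain ⟨hd, _, hmax⟩ := (fold_spec v L none).2 g hbl
    have hd' : ∃ e ∈ L, CondB v e ∧ e.length = g := by
      rcases hd with hd | hd
      · exact absurd hd (by simp)
      · exact hd
    obtain ⟨e, heL, hce, hlen⟩ := hd'
    obtain ⟨hPg, hgn⟩ := bridge1 L v e heL hce
    rw [hlen] at hPg hgn
    have hgG : g ≤ Nat.findGreatest (PfxP L v) (v.length - 1) :=
      Nat.le_findGreatest hgn hPg
    have hPG : PfxP L v (Nat.findGreatest (PfxP L v) (v.length - 1)) :=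
      Nat.findGreatest_spec hgn hPg
    have hGn : Nat.findGreatest (PfxP L v) (v.length - 1) ≤ v.length - 1 :=
      Nat.findGreatest_le _
    obtain ⟨hcG, hlenG⟩ := bridge2 L v _ hPG hGn
    have hGg : Nat.findGreatest (PfxP L v) (v.length - 1) ≤ g := by
      have := hmax _ hPG.2 hcG
      omega
    have h2g : 2 ≤ g := by rw [← hlen]; exact hce.1
    rw [if_neg (by omega)]
    congr 1
    omega

-- ===== VERDICT (by name: the statement is the Claim_ definition above) =====
theorem get_wubi_key_spec : Claim_equal_get_wubi_key := by
  intro value _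
  unfold Spec_get_wubi_key get_wubi_key get_wubi_key_alt
  simp only [scanDown_eq, bestLen_eq, keyComb, keyTup]
  split_ifs <;> rfl
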